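-- pv_equiv track=rewrite | github.com/tingtingtina/StringCovertTool3 | utils/HtmlUtils.py | reverse_replace_str
-- ===== SOURCE A (Python) =====
-- def reverse_change_str(base_str):
--     """
--     $$1s ==> %1$s
--     $$s ==> %s
--     :param base_str: format: $$1s or $$s
--     :return: format: %1$s or %s
--     """
--     new_str = '%'
--     new_str += base_str[2]
--     if len(base_str) == 4:
--         new_str += '$' + base_str[3]
--     return new_str
--
-- def reverse_replace_str(base_str, change_word):
--     """
--     将base_str中需要替代的字符（change_word）替换成需要的格式
--     :param base_str: 源字符串
--     :param change_word: 需要替换的字符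
--     :return: 转换后的字符串
--     """
--     new_str = ''
--     if len(change_word) == 4:
--         while change_word in base_str:
--             start = base_str.find(change_word)
--             new_str += base_str[:start] + reverse_change_str(base_str[start:start + 4])
--             base_str = base_str[start + 4:]
--     elif len(change_word) == 3:
--         while change_word in base_str:
--             start = base_str.find(change_word)
--             new_str += base_str[:start] + reverse_change_str(base_str[start:start + 3])
--             base_str = base_str[start + 3:]
--     new_str += base_str
--     return new_str
-- ===== SOURCE B (Python) =====
-- def reverse_change_str(base_str):
--     new_str = '%'
--     new_str += base_str[2]
--     if len(base_str) == 4: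
--         new_str += '$' + base_str[3]
--     return new_str
--
-- def reverse_replace_str(base_str, change_word):
--     if len(change_word) not in (3, 4):
--         return base_str
--     repl = reverse_change_str(change_word)
--     return repl.join(base_str.split(change_word))
-- ===== Notes on version B (the rewrite author's own statement) =====
-- stated objective: simpler
-- what changed: A's manual while/find/slice accumulator loop (duplicated for token lengths 4 and 3) is replaced by computing the reformatted constant once and rejoining base_str.split(change_word) with it, after a single length-in-(3,4) guard.
import Mathlib
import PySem

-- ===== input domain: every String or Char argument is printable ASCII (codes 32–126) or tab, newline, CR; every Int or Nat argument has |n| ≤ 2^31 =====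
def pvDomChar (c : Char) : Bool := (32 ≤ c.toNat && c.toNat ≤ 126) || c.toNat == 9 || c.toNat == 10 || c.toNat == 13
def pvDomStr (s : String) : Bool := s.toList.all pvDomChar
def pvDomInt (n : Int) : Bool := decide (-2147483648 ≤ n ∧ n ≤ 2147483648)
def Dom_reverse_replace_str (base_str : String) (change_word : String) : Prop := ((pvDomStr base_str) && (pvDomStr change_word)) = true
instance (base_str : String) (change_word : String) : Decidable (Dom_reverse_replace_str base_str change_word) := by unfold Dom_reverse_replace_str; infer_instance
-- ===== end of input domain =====

-- B replaces A's manual find/slice accumulator loop with one guard plus split-on-token/rejoin-with-constant; simpler, same result.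

-- ===== PORT A =====

-- termination fact for the while-loops (A's loop and the proof-side split): cited by decreasing_by
theorem pv_drop_lt (cw s : List Char) (h : cw ≠ [] ∧ PySem.Chars.isIn cw s = true) :
    s.length - ((PySem.Chars.find s cw).toNat + cw.length) < s.length := by
  obtain ⟨hne, hin⟩ := h
  have hinf : cw <:+: s := (PySem.Chars.isIn_iff_infix cw s).mp hin
  have h1 : 0 < cw.length := List.length_pos_iff.mpr hne
  have h2 : cw.length ≤ s.length := hinf.length_le
  omega

-- helper reverse_change_str, as in the Python module (A's copy; B's port carries its own transliteration).
-- b[2]/b[3] exist at every call site (b always has length 3 resp. 4), so the `.getD ' '` totality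
-- defaults (Python would raise IndexError there) are unreachable.
def reverse_change_str_port (b : List Char) : List Char :=
  let new1 := ['%'] ++ [(PySem.List.pyGet? b 2).getD ' ']
  if b.length = 4 then new1 ++ ['$'] ++ [(PySem.List.pyGet? b 3).getD ' '] else new1

-- A's two while-loops are identical up to the literal 3/4, which in each branch equals
-- change_word's length; they are ported as this one helper using cw.length for that literal.
-- new_str is the accumulator acc; base_str[:start] = take, base_str[start:start+k] / [start+k:] = drop/take
-- (all slice indices are nonnegative and in range here, so Python slicing is List.take/List.drop).
def pvLoopA (cw : List Char) (s : List Char) (acc : List Char) : List Char :=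
  if h : cw ≠ [] ∧ PySem.Chars.isIn cw s = true then
    let start := (PySem.Chars.find s cw).toNat
    pvLoopA cw (s.drop (start + cw.length))
      (acc ++ s.take start ++ reverse_change_str_port ((s.drop start).take cw.length))
  else acc ++ s
termination_by s.length
decreasing_by simpa using pv_drop_lt cw s h

def reverse_replace_str (base_str : String) (change_word : String) : String :=
  let s := base_str.toList
  let cw := change_word.toList
  if cw.length = 4 then String.ofList (pvLoopA cw s [])
  else if cw.length = 3 then String.ofList (pvLoopA cw s [])
  else String.ofList ([] ++ s)

-- ===== PORT B =====
-- B-side transliteration of the module helper reverse_change_str (same Python function; ported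
-- separately so each port is self-contained). The `.getD ' '` totality defaults are unreachable:
-- b always has length 3 or 4 here.
def reverse_change_str_alt_port (b : List Char) : List Char :=
  let new1 := ['%'] ++ [(PySem.List.pyGet? b 2).getD ' ']
  if b.length = 4 then new1 ++ ['$'] ++ [(PySem.List.pyGet? b 3).getD ' '] else new1

def reverse_replace_str_alt (base_str : String) (change_word : String) : String :=
  let cw := change_word.toList
  if cw.length ≠ 3 ∧ cw.length ≠ 4 then base_str
  else
    let repl := reverse_change_str_alt_port cw
    String.ofList (PySem.Chars.join repl (PySem.Chars.splitOn base_str.toList cw))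

-- ===== PRECONDITION & SPEC =====
def Spec_reverse_replace_str (base_str : String) (change_word : String) (out : String) : Prop := out = reverse_replace_str_alt base_str change_word
instance (base_str : String) (change_word : String) (out : String) : Decidable (Spec_reverse_replace_str base_str change_word out) := by unfold Spec_reverse_replace_str; infer_instance

-- ===== CLAIM (what is proved, stated in full; the proofs are below) =====
def Claim_equal_reverse_replace_str : Prop := ∀ (base_str : String) (change_word : String), Dom_reverse_replace_str base_str change_word → Spec_reverse_replace_str base_str change_word (reverse_replace_str base_str change_word)

-- ===== LEMMAS AND PROOFS =====

-- the two transliterations of the module helper reverse_change_str coincide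
theorem pv_revchange_eq (b : List Char) :
    reverse_change_str_alt_port b = reverse_change_str_port b := rfl

-- reference splitter: first-occurrence split, mirroring A's loop skeleton
def pvSplit (cw : List Char) (s : List Char) : List (List Char) :=
  if h : cw ≠ [] ∧ PySem.Chars.isIn cw s = true then
    let start := (PySem.Chars.find s cw).toNat
    s.take start :: pvSplit cw (s.drop (start + cw.length))
  else [s]
termination_by s.length
decreasing_by simpa using pv_drop_lt cw s h

theorem pvSplit_ne_nil (cw s : List Char) : pvSplit cw s ≠ [] := by
  unfold pvSplit; split <;> simp

theorem pv_prefix_infix {sub s : List Char} {j : ℕ} (h : sub <+: s.drop j) : sub <:+: s := by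
  obtain ⟨t, ht⟩ := h
  exact ⟨s.take j, t, by rw [List.append_assoc, ht, List.take_append_drop]⟩

theorem pv_find_eq (s sub : List Char) (j : ℕ) (hpre : sub <+: s.drop j)
    (hmin : ∀ i < j, ¬ sub <+: s.drop i) : PySem.Chars.find s sub = j := by
  have hinf : sub <:+: s := pv_prefix_infix hpre
  have hnn : 0 ≤ PySem.Chars.find s sub := (PySem.Chars.find_nonneg_iff s sub).mpr hinf
  obtain ⟨h1, h2⟩ := PySem.Chars.find_spec hnn
  rcases lt_trichotomy (PySem.Chars.find s sub).toNat j with hl | he | hg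
  · exact absurd h1 (hmin _ hl)
  · omega
  · exact absurd hpre (h2 j hg)

theorem pv_infix_cons {cw : List Char} {c : Char} {rest : List Char} (h : ¬ cw <+: (c :: rest)) :
    (cw <:+: (c :: rest)) ↔ (cw <:+: rest) := by
  constructor
  · intro hin
    obtain ⟨j, hj⟩ := (PySem.Chars.exists_prefix_drop_iff_isIn cw (c :: rest)).mpr
      ((PySem.Chars.isIn_iff_infix _ _).mpr hin)
    cases j with
    | zero => exact absurd (by simpa using hj) h
    | succ m => exact pv_prefix_infix (j := m) (by simpa using hj)
  · intro hin
    exact hin.trans (List.suffix_cons c rest).isInfix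

theorem pvSplit_cons (cw : List Char) (c : Char) (rest : List Char) (hne : cw ≠ [])
    (h : ¬ cw <+: (c :: rest)) :
    pvSplit cw (c :: rest) = (pvSplit cw rest).modifyHead (c :: ·) := by
  by_cases hrest : PySem.Chars.isIn cw rest = true
  · have hinr : cw <:+: rest := (PySem.Chars.isIn_iff_infix cw rest).mp hrest
    have hins : PySem.Chars.isIn cw (c :: rest) = true :=
      (PySem.Chars.isIn_iff_infix _ _).mpr ((pv_infix_cons h).mpr hinr)
    have hnnr : 0 ≤ PySem.Chars.find rest cw := (PySem.Chars.find_nonneg_iff rest cw).mpr hinr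
    obtain ⟨hp, hm⟩ := PySem.Chars.find_spec hnnr
    set i := (PySem.Chars.find rest cw).toNat with hi
    have hfind : PySem.Chars.find (c :: rest) cw = (i + 1 : ℕ) := by
      apply pv_find_eq
      · simpa using hp
      · intro k hk
        cases k with
        | zero => simpa using h
        | succ m => intro hpm; exact hm m (by omega) (by simpa using hpm)
    rw [pvSplit, pvSplit]
    rw [dif_pos ⟨hne, hins⟩, dif_pos ⟨hne, hrest⟩]
    simp only [hfind, ← hi, Int.toNat_natCast]
    have e2 : i + 1 + cw.length = (i + cw.length) + 1 := by omega
    simp [List.modifyHead, e2]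
  · have hnin : ¬ cw <:+: (c :: rest) := by
      rw [pv_infix_cons h]
      exact fun hx => hrest ((PySem.Chars.isIn_iff_infix _ _).mpr hx)
    rw [pvSplit, pvSplit]
    rw [dif_neg (by

      intro hx
      exact hnin ((PySem.Chars.isIn_iff_infix _ _).mp hx.2)),
      dif_neg (by intro hx; exact hrest hx.2)]
    simp [List.modifyHead]

theorem pv_go_nil (sep : List Char) (fuel : ℕ) (cur : List Char) (acc : List (List Char)) :
    PySem.Chars.splitOn.go sep fuel [] cur acc = (cur.reverse :: acc).reverse := by
  cases fuel <;> simp [PySem.Chars.splitOn.go]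

theorem pv_go_cons (sep : List Char) (fuel : ℕ) (c : Char) (rest cur : List Char)
    (acc : List (List Char)) :
    PySem.Chars.splitOn.go sep (fuel + 1) (c :: rest) cur acc =
      if sep.isPrefixOf (c :: rest) then
        PySem.Chars.splitOn.go sep fuel (List.drop sep.length (c :: rest)) [] (cur.reverse :: acc)
      else PySem.Chars.splitOn.go sep fuel rest (c :: cur) acc := by
  rw [PySem.Chars.splitOn.go]

theorem pv_go_eq (cw : List Char) (hne : cw ≠ []) :
    ∀ fuel s cur acc, s.length < fuel →
      PySem.Chars.splitOn.go cw fuel s cur acc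
        = acc.reverse ++ ((pvSplit cw s).modifyHead (cur.reverse ++ ·)) := by
  intro fuel
  induction fuel with
  | zero => intro s cur acc h; omega
  | succ fuel ih =>
    intro s cur acc h
    cases s with
    | nil =>
      rw [pv_go_nil]
      have : pvSplit cw [] = [[]] := by
        rw [pvSplit, dif_neg]
        intro hx
        have := (PySem.Chars.isIn_iff_infix cw []).mp hx.2
        simp at this
        exact hne this
      simp [this, List.modifyHead]
    | cons c rest =>
      rw [pv_go_cons]
      by_cases hpre : cw.isPrefixOf (c :: rest) = true
      · simp only [hpre, if_true]
        have hpre' : cw <+: (c :: rest) := List.isPrefixOf_iff_prefix.mp hpre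
        have hfind : PySem.Chars.find (c :: rest) cw = (0 : ℕ) :=
          pv_find_eq _ _ 0 (by simpa using hpre') (by omega)
        have hin : PySem.Chars.isIn cw (c :: rest) = true :=
          (PySem.Chars.isIn_iff_infix _ _).mpr (pv_prefix_infix (j := 0) (by simpa using hpre'))
        have hlen : ((c :: rest).drop cw.length).length < fuel := by
          have h1 : 0 < cw.length := List.length_pos_iff.mpr hne
          simp only [List.length_drop, List.length_cons] at *
          omega
        rw [ih _ [] (cur.reverse :: acc) hlen]
        conv_rhs => rw [pvSplit]
        rw [dif_pos ⟨hne, hin⟩]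
        simp only [hfind, Int.toNat_natCast, Nat.zero_add]
        have hsp := pvSplit_ne_nil cw ((c :: rest).drop cw.length)
        cases hx : pvSplit cw ((c :: rest).drop cw.length) with
        | nil => exact absurd hx hsp
        | cons a t => simp [List.modifyHead]
      · simp only [hpre]
        have hlen : rest.length < fuel := by simp at h; omega
        rw [ih rest (c :: cur) acc hlen]
        have hnp : ¬ cw <+: (c :: rest) := fun hx => hpre (List.isPrefixOf_iff_prefix.mpr hx)
        rw [pvSplit_cons cw c rest hne hnp]
        have hsp := pvSplit_ne_nil cw rest
        cases hx : pvSplit cw rest with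
        | nil => exact absurd hx hsp
        | cons a t => simp [List.modifyHead]

theorem pv_splitOn_eq (cw s : List Char) (hne : cw ≠ []) :
    PySem.Chars.splitOn s cw = pvSplit cw s := by
  rw [PySem.Chars.splitOn, pv_go_eq cw hne (s.length + 1) s [] [] (by omega)]
  have hsp := pvSplit_ne_nil cw s
  cases hx : pvSplit cw s with
  | nil => exact absurd hx hsp
  | cons a t => simp [List.modifyHead]

theorem pv_intercalate_cons (sep a : List Char) (rest : List (List Char)) (h : rest ≠ []) :
    sep.intercalate (a :: rest) = a ++ sep ++ sep.intercalate rest := by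
  cases rest with
  | nil => exact absurd rfl h
  | cons b t => simp [List.intercalate, List.intersperse, List.append_assoc]

theorem pv_loopA_eq (cw : List Char) (hne : cw ≠ []) :
    ∀ s acc, pvLoopA cw s acc = acc ++ (reverse_change_str_port cw).intercalate (pvSplit cw s) := by
  intro s
  induction hn : s.length using Nat.strong_induction_on generalizing s with
  | _ n ih =>
  intro acc
  by_cases hin : PySem.Chars.isIn cw s = true
  · have hinf : cw <:+: s := (PySem.Chars.isIn_iff_infix cw s).mp hin
    have hnn : 0 ≤ PySem.Chars.find s cw := (PySem.Chars.find_nonneg_iff s cw).mpr hinf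
    obtain ⟨hp, _⟩ := PySem.Chars.find_spec hnn
    set i := (PySem.Chars.find s cw).toNat with hi
    have hslice : (s.drop i).take cw.length = cw := by
      obtain ⟨t, ht⟩ := hp
      rw [← ht, List.take_left]
    rw [pvLoopA, dif_pos ⟨hne, hin⟩]
    have hlt : (s.drop (i + cw.length)).length < n := by
      have := pv_drop_lt cw s ⟨hne, hin⟩
      simp only [List.length_drop]
      omega
    rw [ih _ (by omega) _ rfl]
    conv_rhs => rw [pvSplit]
    rw [dif_pos ⟨hne, hin⟩]
    simp only [← hi, hslice]
    rw [pv_intercalate_cons _ _ _ (pvSplit_ne_nil cw _)]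
    simp [List.append_assoc]
  · rw [pvLoopA, dif_neg (by intro hx; exact hin hx.2)]
    rw [pvSplit, dif_neg (by intro hx; exact hin hx.2)]
    simp [List.intercalate]

-- ===== VERDICT (by name: the statement is the Claim_ definition above) =====
theorem reverse_replace_str_spec : Claim_equal_reverse_replace_str := by
  unfold Claim_equal_reverse_replace_str
  intro base_str change_word _
  unfold Spec_reverse_replace_str reverse_replace_str reverse_replace_str_alt
  simp only []
  set s := base_str.toList
  set cw := change_word.toList with hcw
  by_cases h4 : cw.length = 4
  · have hne : cw ≠ [] := by intro hx; rw [hx] at h4; simp at h4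
    rw [if_pos h4, if_neg (by omega)]
    rw [pv_loopA_eq cw hne s [], pv_splitOn_eq cw s hne]
    simp [PySem.Chars.join, pv_revchange_eq]
  · by_cases h3 : cw.length = 3
    · have hne : cw ≠ [] := by intro hx; rw [hx] at h3; simp at h3
      rw [if_neg h4, if_pos h3, if_neg (by omega)]
      rw [pv_loopA_eq cw hne s [], pv_splitOn_eq cw s hne]
      simp [PySem.Chars.join, pv_revchange_eq]
    · rw [if_neg h4, if_neg h3, if_pos ⟨h3, h4⟩]
      simp [s]
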